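-- pv_equiv track=rewrite | github.com/PacekMikolaj/PS | cw2/operations.py | merge_characters_and_duplicate
-- ===== SOURCE A (Python) =====
-- def merge_characters_and_duplicate(string):
--     if len(string) < 2:
--         return ""
--     returnString = ""
--     for x in range(len(string)):
--         if x % 2 == 0:
--             returnString += string[0]
--         else:
--             returnString += string[-2]
--     return returnString
-- ===== SOURCE B (Python) =====
-- def merge_characters_and_duplicate(string):
--     if len(string) < 2:
--         return ""
--     block = string[0] + string[-2]
--     return (block * ((len(string) + 1) // 2))[:len(string)]
-- ===== Notes on version B (the rewrite author's own statement) =====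
-- stated objective: faster
-- what changed: Replaced the per-index loop with a modulo-2 branch and repeated string concatenation by a closed-form construction: build the two-character block string[0]+string[-2] once, repeat it ceil(n/2) times and slice to length n.
import Mathlib
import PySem

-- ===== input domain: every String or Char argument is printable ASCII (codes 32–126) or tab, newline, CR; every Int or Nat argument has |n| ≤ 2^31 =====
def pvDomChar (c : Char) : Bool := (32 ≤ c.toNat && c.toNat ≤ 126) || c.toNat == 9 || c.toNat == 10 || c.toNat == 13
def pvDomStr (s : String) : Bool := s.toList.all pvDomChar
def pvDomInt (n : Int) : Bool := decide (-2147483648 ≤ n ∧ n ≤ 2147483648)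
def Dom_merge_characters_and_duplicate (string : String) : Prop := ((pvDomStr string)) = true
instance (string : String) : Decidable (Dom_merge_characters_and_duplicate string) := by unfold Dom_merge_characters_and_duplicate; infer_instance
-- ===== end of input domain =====

-- B replaces A's per-index modulo-branching loop (quadratic repeated concatenation) by a closed
-- form: repeat the block string[0]+string[-2] ceil(n/2) times and slice to length n (objective: faster).

-- ===== PORT A =====
-- loop 'for x in range(len(string))' appending string[0] / string[-2];
-- the length-2 guard makes both indexings in range, so pyGet? is always some
-- and 'Option.toList' (= the one-character string appended) is exact here.
def merge_characters_and_duplicate (string : String) : String :=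
  let cs := string.toList
  if cs.length < 2 then ""
  else
    String.ofList
      ((PySem.List.pyRange 0 (cs.length : Int) 1).foldl
        (fun acc x =>
          if PySem.Int.mod x 2 == 0 then acc ++ (PySem.List.pyGet? cs 0).toList
          else acc ++ (PySem.List.pyGet? cs (-2)).toList) [])

-- ===== PORT B =====
-- block = string[0] + string[-2]; (block * ((n+1)//2))[:n]
def merge_characters_and_duplicate_alt (string : String) : String :=
  let cs := string.toList
  if cs.length < 2 then ""
  else
    let block := (PySem.List.pyGet? cs 0).toList ++ (PySem.List.pyGet? cs (-2)).toList
    String.ofList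
      (PySem.List.slice
        (PySem.List.pyRepeat block (PySem.Int.floordiv ((cs.length : Int) + 1) 2))
        none (some (cs.length : Int)))

-- ===== PRECONDITION & SPEC =====
def Spec_merge_characters_and_duplicate (string : String) (out : String) : Prop := out = merge_characters_and_duplicate_alt string
instance (string : String) (out : String) : Decidable (Spec_merge_characters_and_duplicate string out) := by unfold Spec_merge_characters_and_duplicate; infer_instance

-- ===== CLAIM (what is proved, stated in full; the proofs are below) =====
def Claim_equal_merge_characters_and_duplicate : Prop := ∀ (string : String), Dom_merge_characters_and_duplicate string → Spec_merge_characters_and_duplicate string (merge_characters_and_duplicate string)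

-- ===== LEMMAS AND PROOFS =====

-- take n of the repeated two-character block is the alternating list of length n
lemma take_flatten_replicate_pair {α : Type} (a b : α) :
    ∀ (k n : Nat), n ≤ 2 * k →
      List.take n ((List.replicate k [a, b]).flatten)
        = (List.range n).map (fun i => if i % 2 = 0 then a else b) := by
  intro k
  induction k with
  | zero => intro n hn; interval_cases n; simp
  | succ k ih =>
    intro n hn
    match n with
    | 0 => simp
    | 1 => simp [List.replicate_succ]
    | (m + 2) =>
      have hr : List.range (m + 2) = 0 :: 1 :: (List.range m).map (fun i => i + 2) := by
        rw [List.range_succ_eq_map, List.range_succ_eq_map]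
        simp only [List.map_cons, List.map_map]
        refine congrArg _ (congrArg _ (List.map_congr_left fun i _ => ?_))
        simp [Function.comp]
      have h2 : (List.range (m + 2)).map (fun i => if i % 2 = 0 then a else b)
          = a :: b :: (List.range m).map (fun i => if i % 2 = 0 then a else b) := by
        rw [hr]
        simp only [List.map_cons, List.map_map]
        norm_num
      rw [h2, List.replicate_succ, List.flatten_cons]
      simp only [List.cons_append, List.nil_append, List.take_succ_cons]
      rw [ih m (by omega)]

-- ===== VERDICT (by name: the statement is the Claim_ definition above) =====
theorem merge_characters_and_duplicate_spec : Claim_equal_merge_characters_and_duplicate := by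
  intro string _
  unfold Spec_merge_characters_and_duplicate merge_characters_and_duplicate
    merge_characters_and_duplicate_alt
  set cs := string.toList with hcs
  by_cases h : cs.length < 2
  · simp [h]
  · simp only [h, if_false]
    rw [not_lt] at h
    -- resolve the two indexings
    have h0 : PySem.List.pyGet? cs 0 = some (cs[0]'(by omega)) := by
      rw [PySem.List.pyGet?_zero, List.getElem?_eq_getElem (by omega)]
    have hneg : PySem.List.pyGet? cs (-2) = some (cs[cs.length - 2]'(by omega)) := by
      rw [PySem.List.pyGet?_neg_ofNat cs 2 (by omega) (by simpa using h),
        List.getElem?_eq_getElem (by omega)]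
    set a := cs[0]'(by omega)
    set b := cs[cs.length - 2]'(by omega)
    rw [h0, hneg]
    -- A side: the appending loop is a map over the range
    have hfun : (fun (acc : List Char) (x : Int) =>
        if PySem.Int.mod x 2 == 0 then acc ++ (some a).toList else acc ++ (some b).toList)
        = fun acc x => acc ++ [if PySem.Int.mod x 2 == 0 then a else b] := by
      funext acc x; split <;> simp
    rw [hfun, PySem.List.foldl_append_singleton_eq_map, List.nil_append,
      PySem.List.pyRange_one, List.map_map]
    simp only [Int.sub_zero, Int.toNat_natCast, Option.toList, List.singleton_append]
    -- B side: repeat-and-slice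
    have hK : (PySem.Int.floordiv ((cs.length : Int) + 1) 2).toNat = (cs.length + 1) / 2 := by
      rw [PySem.Int.floordiv_eq_ediv_of_pos (by norm_num)]; omega
    rw [PySem.List.slice_to_natCast, PySem.List.pyRepeat, hK,
      take_flatten_replicate_pair a b _ _ (by omega)]
    congr 1
    apply List.map_congr_left
    intro i _
    have hmod : (PySem.Int.mod ((0 : Int) + (i : Int)) 2 == 0) = decide (i % 2 = 0) := by
      rw [PySem.Int.mod_eq_emod_of_pos (by norm_num)]
      by_cases hp : i % 2 = 0 <;> simp [hp] <;> omega
    simp only [Function.comp, hmod]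
    by_cases hp : i % 2 = 0 <;> simp [hp]
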